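-- pv_equiv track=rewrite | github.com/ZhifuWei/FAERec | Preprosessing/data_process.py | id_map
-- ===== SOURCE A (Python) =====
-- def id_map(user_items):
--
--     user2id = {}
--     item2id = {}
--     id2user = {}
--     id2item = {}
--     user_id = 1
--     item_id = 1
--     final_data = {}
--     for user, items in user_items.items():
--         if user not in user2id:
--             user2id[user] = str(user_id)
--             id2user[str(user_id)] = user
--             user_id += 1
--         iids = []
--         for item in items:
--             if item not in item2id:
--                 item2id[item] = str(item_id)
--                 id2item[str(item_id)] = item
--                 item_id += 1
--             iids.append(item2id[item])
--         uid = user2id[user]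
--         final_data[uid] = iids
--     data_maps = {
--         'user2id': user2id,
--         'item2id': item2id,
--         'id2user': id2user,
--         'id2item': id2item
--     }
--     return final_data, user_id-1, item_id-1, data_maps
-- ===== SOURCE B (Python) =====
-- def id_map(user_items):
--     user_list = list(user_items)
--     item_list = list(dict.fromkeys(i for items in user_items.values() for i in items))
--     user2id = {u: str(k) for k, u in enumerate(user_list, 1)}
--     id2user = {str(k): u for k, u in enumerate(user_list, 1)}
--     item2id = {i: str(k) for k, i in enumerate(item_list, 1)}
--     id2item = {str(k): i for k, i in enumerate(item_list, 1)}
--     final_data = {user2id[u]: [item2id[i] for i in items]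
--                   for u, items in user_items.items()}
--     data_maps = {
--         'user2id': user2id,
--         'item2id': item2id,
--         'id2user': id2user,
--         'id2item': id2item
--     }
--     return final_data, len(user_list), len(item_list), data_maps
-- ===== Notes on version B (the rewrite author's own statement) =====
-- stated objective: alternative
-- what changed: A interleaves id assignment, inverse-map maintenance and translation in one nested stateful loop; B first computes the ordered user list and the ordered deduplicated item list, derives all four id maps by enumerate(...,1) comprehensions, and then translates user_items in a separate final pass.
import Mathlib
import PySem

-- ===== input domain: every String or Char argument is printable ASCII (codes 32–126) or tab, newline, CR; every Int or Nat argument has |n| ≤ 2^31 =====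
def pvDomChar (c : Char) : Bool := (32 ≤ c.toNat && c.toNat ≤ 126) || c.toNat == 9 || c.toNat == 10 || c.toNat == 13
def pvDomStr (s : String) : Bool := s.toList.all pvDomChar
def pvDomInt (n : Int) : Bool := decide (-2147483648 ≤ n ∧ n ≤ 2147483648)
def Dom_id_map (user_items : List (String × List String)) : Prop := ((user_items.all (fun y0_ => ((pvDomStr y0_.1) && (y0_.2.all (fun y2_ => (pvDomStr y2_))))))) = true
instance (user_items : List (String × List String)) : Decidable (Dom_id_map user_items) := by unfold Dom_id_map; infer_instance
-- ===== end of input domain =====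

-- B assigns ids by enumerating the ordered user list and the ordered deduplicated item list first,
-- then translates in a separate pass (objective: alternative decomposition, same cost).
-- user_items is a Python dict, modelled as an association list with distinct keys (see Pre_id_map).

-- ===== PORT A =====
-- inner loop of A: for item in items: (conditionally assign a fresh id) ; iids.append(item2id[item])
def istepA (s : (PySem.Dict String String) × (PySem.Dict String String) × Int × List String)
    (item : String) : (PySem.Dict String String) × (PySem.Dict String String) × Int × List String :=
  match s with
  | (i2i, id2i, iid, iids) =>
    let r := if i2i.contains item then (i2i, id2i, iid)
             else (i2i.insert item (PySem.Int.toStr iid), id2i.insert (PySem.Int.toStr iid) item, iid + 1)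
    -- item2id[item]: the key was just ensured present, so the "" default is never used
    (r.1, r.2.1, r.2.2, iids ++ [r.1.getD item ""])

-- outer loop body of A; state = (user2id, item2id, id2user, id2item, user_id, item_id, final_data)
def ostepA (st : (PySem.Dict String String) × (PySem.Dict String String) × (PySem.Dict String String) ×
      (PySem.Dict String String) × Int × Int × (PySem.Dict String (List String)))
    (p : String × List String) : (PySem.Dict String String) × (PySem.Dict String String) ×
      (PySem.Dict String String) × (PySem.Dict String String) × Int × Int × (PySem.Dict String (List String)) :=
  match st with
  | (u2i, i2i, id2u, id2i, uid, iid, fin) =>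
    let u := if u2i.contains p.1 then (u2i, id2u, uid)
             else (u2i.insert p.1 (PySem.Int.toStr uid), id2u.insert (PySem.Int.toStr uid) p.1, uid + 1)
    let r := p.2.foldl istepA (i2i, id2i, iid, [])
    -- uid = user2id[user]: the key was just ensured present, so the "" default is never used
    (u.1, r.1, u.2.1, r.2.1, u.2.2, r.2.2.1, fin.insert (u.1.getD p.1 "") r.2.2.2)

def id_map (user_items : List (String × List String)) :
    (List (String × List String)) × Int × Int × (List (String × List (String × String))) :=
  let st := user_items.foldl ostepA
    (PySem.Dict.empty, PySem.Dict.empty, PySem.Dict.empty, PySem.Dict.empty, (1 : Int), (1 : Int), PySem.Dict.empty)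
  (st.2.2.2.2.2.2.items, st.2.2.2.2.1 - 1, st.2.2.2.2.2.1 - 1,
   [("user2id", st.1.items), ("item2id", st.2.1.items), ("id2user", st.2.2.1.items), ("id2item", st.2.2.2.1.items)])

-- ===== PORT B =====
def id_map_alt (user_items : List (String × List String)) :
    (List (String × List String)) × Int × Int × (List (String × List (String × String))) :=
  let user_list := user_items.map Prod.fst
  let item_list := PySem.List.dedup (user_items.flatMap Prod.snd)
  -- the four dict comprehensions over enumerate(..., 1)
  let user2id := (PySem.List.enumerate user_list 1).foldl (fun d p => d.insert p.2 (PySem.Int.toStr p.1)) PySem.Dict.empty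
  let id2user := (PySem.List.enumerate user_list 1).foldl (fun d p => d.insert (PySem.Int.toStr p.1) p.2) PySem.Dict.empty
  let item2id := (PySem.List.enumerate item_list 1).foldl (fun d p => d.insert p.2 (PySem.Int.toStr p.1)) PySem.Dict.empty
  let id2item := (PySem.List.enumerate item_list 1).foldl (fun d p => d.insert (PySem.Int.toStr p.1) p.2) PySem.Dict.empty
  -- final translation pass; user2id[u] / item2id[i] are always present, so the "" default is never used
  let final_data := user_items.foldl
    (fun d p => d.insert (user2id.getD p.1 "") (p.2.map (fun i => item2id.getD i ""))) PySem.Dict.empty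
  (final_data.items, (user_list.length : Int), (item_list.length : Int),
   [("user2id", user2id.items), ("item2id", item2id.items), ("id2user", id2user.items), ("id2item", id2item.items)])

-- ===== PRECONDITION & SPEC =====
-- user_items models a Python dict, whose keys are necessarily distinct; Pre_ excludes association
-- lists with duplicate user keys, which represent no actual input of A (a dict literal collapses them).
def Pre_id_map (user_items : List (String × List String)) : Prop := (user_items.map Prod.fst).Nodup
instance (user_items : List (String × List String)) : Decidable (Pre_id_map user_items) := by
  unfold Pre_id_map; infer_instance

def pvWitness_id_map : (List (String × List String)) := [("a", ["x", "y", "x"]), ("b", ["y", "z"])]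

def Spec_id_map (user_items : List (String × List String))
    (out : (List (String × List String)) × Int × Int × (List (String × List (String × String)))) : Prop :=
  out = id_map_alt user_items
instance (user_items : List (String × List String))
    (out : (List (String × List String)) × Int × Int × (List (String × List (String × String)))) :
    Decidable (Spec_id_map user_items out) := by
  unfold Spec_id_map
  exact @instDecidableEqProd _ _ (by infer_instance)
    (@instDecidableEqProd _ _ (by infer_instance) (by infer_instance)) out (id_map_alt user_items)

-- ===== CLAIM (what is proved, stated in full; the proofs are below) =====
def Claim_equal_id_map : Prop := ∀ (user_items : List (String × List String)),
  Dom_id_map user_items → Pre_id_map user_items → Spec_id_map user_items (id_map user_items)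

-- ===== LEMMAS AND PROOFS =====

-- canonical id table: num [x0, x1, …] k = [(x0, str(k)), (x1, str(k+1)), …]
def num (l : List String) (k : Int) : List (String × String) :=
  match l with
  | [] => []
  | x :: t => (x, PySem.Int.toStr k) :: num t (k + 1)

-- canonical inverse table built by successive inserts
def revD (l : List String) (k : Int) (d : PySem.Dict String String) : PySem.Dict String String :=
  match l with
  | [] => d
  | x :: t => revD t (k + 1) (d.insert (PySem.Int.toStr k) x)

-- the id that the table `num l 1` gives to x
def tagOf (l : List String) (x : String) : String := (PySem.Dict.mk (num l 1)).getD x ""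

theorem num_append (a b : List String) (k : Int) :
    num (a ++ b) k = num a k ++ num b (k + a.length) := by
  induction a generalizing k with
  | nil => simp [num]
  | cons x t ih =>
    have harg : k + 1 + (t.length : Int) = k + ((t.length + 1 : Nat) : Int) := by push_cast; ring
    simp only [List.cons_append, num, ih, List.length_cons, harg]

theorem map_fst_num (l : List String) (k : Int) : (num l k).map Prod.fst = l := by
  induction l generalizing k with
  | nil => simp [num]
  | cons x t ih => simp [num, ih]

theorem getD_mk_append_left (l1 l2 : List (String × String)) (x : String)
    (h : x ∈ l1.map Prod.fst) :
    (PySem.Dict.mk (l1 ++ l2)).getD x "" = (PySem.Dict.mk l1).getD x "" := by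
  induction l1 with
  | nil => simp at h
  | cons p t ih =>
    obtain ⟨a, b⟩ := p
    simp only [PySem.Dict.getD_eq_get?_getD, List.cons_append, PySem.Dict.get?_mk_cons]
    by_cases hax : a = x
    · simp [hax]
    · have hx : x ∈ t.map Prod.fst := by
        rcases (by simpa using h : x = a ∨ x ∈ t.map Prod.fst) with h1 | h1
        · exact absurd h1.symm hax
        · exact h1
      have := ih hx
      simp only [PySem.Dict.getD_eq_get?_getD] at this
      simp [hax, this]

theorem contains_mk_num (l : List String) (k : Int) (x : String) :
    (PySem.Dict.mk (num l k)).contains x = l.contains x := by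
  induction l generalizing k with
  | nil => simp [num, PySem.Dict.contains_mk]
  | cons y t ih =>
    have := ih (k + 1)
    simp only [PySem.Dict.contains_mk] at this ⊢
    simp [num, this]
    rcases eq_or_ne x y with hxy | hxy
    · simp [hxy]
    · simp [beq_iff_eq, hxy, Ne.symm hxy]

theorem getD_mk_num_self (a : List String) (x : String) (k : Int) (h : x ∉ a) :
    (PySem.Dict.mk (num (a ++ [x]) k)).getD x "" = PySem.Int.toStr (k + a.length) := by
  induction a generalizing k with
  | nil => simp [num, PySem.Dict.getD_eq_get?_getD, PySem.Dict.get?_mk_cons]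
  | cons y t ih =>
    have hxy : ¬ (y == x) = true := by
      simp only [beq_iff_eq]
      intro hc; exact h (by simp [hc])
    have ht : x ∉ t := fun hc => h (by simp [hc])
    have harg : k + 1 + (t.length : Int) = k + ((t.length + 1 : Nat) : Int) := by push_cast; ring
    have := ih (k + 1) ht
    simp only [PySem.Dict.getD_eq_get?_getD] at this ⊢
    simp only [List.cons_append, num, PySem.Dict.get?_mk_cons, if_neg hxy]
    rw [this, harg]
    simp

theorem tagOf_prefix (a t : List String) (x : String) (h : x ∈ a) :
    tagOf (a ++ t) x = tagOf a x := by
  unfold tagOf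
  rw [num_append]
  exact getD_mk_append_left _ _ _ (by rw [map_fst_num]; exact h)

theorem dedup_prefix (s t : List String) :
    ∃ w, PySem.List.dedup (s ++ t) = PySem.List.dedup s ++ w := by
  rw [PySem.List.dedup_eq_ofList, PySem.List.dedup_eq_ofList, PySem.Set.ofList_append,
    PySem.Set.update_eq_append_filter]
  exact ⟨_, rfl⟩

theorem tag_dedup_prefix (s t : List String) (x : String) (h : x ∈ s) :
    tagOf (PySem.List.dedup (s ++ t)) x = tagOf (PySem.List.dedup s) x := by
  obtain ⟨w, hw⟩ := dedup_prefix s t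
  rw [hw]
  exact tagOf_prefix _ _ _ ((PySem.List.mem_dedup _ _).mpr h)

theorem dedup_snoc_mem (s : List String) (x : String) (h : x ∈ s) :
    PySem.List.dedup (s ++ [x]) = PySem.List.dedup s := by
  rw [PySem.List.dedup_eq_ofList, PySem.List.dedup_eq_ofList, PySem.Set.ofList_append_singleton,
    PySem.Set.add]
  rw [if_pos ((PySem.Set.contains_iff _ _).mpr ((PySem.Set.mem_ofList _ _).mpr h))]

theorem dedup_snoc_not_mem (s : List String) (x : String) (h : ¬ x ∈ s) :
    PySem.List.dedup (s ++ [x]) = PySem.List.dedup s ++ [x] := by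
  rw [PySem.List.dedup_eq_ofList, PySem.List.dedup_eq_ofList, PySem.Set.ofList_append_singleton,
    PySem.Set.add]
  rw [if_neg (by intro hc; exact h ((PySem.Set.mem_ofList _ _).mp ((PySem.Set.contains_iff _ _).mp hc)))]

theorem insert_fresh {ν : Type} (d : PySem.Dict String ν) (x : String) (v : ν)
    (h : d.contains x = false) :
    d.insert x v = PySem.Dict.mk (d.items ++ [(x, v)]) := by
  apply PySem.Dict.ext
  rw [PySem.Dict.items_insert_of_not_contains _ _ h]

theorem revD_snoc (a : List String) (x : String) (k : Int) (d : PySem.Dict String String) :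
    revD (a ++ [x]) k d = (revD a k d).insert (PySem.Int.toStr (k + a.length)) x := by
  induction a generalizing k d with
  | nil => simp [revD]
  | cons y t ih =>
    have harg : k + 1 + (t.length : Int) = k + ((t.length + 1 : Nat) : Int) := by push_cast; ring
    simp only [List.cons_append, revD, ih, harg]
    simp

theorem innerA_spec (l : List String) (s : List String) (iids : List String) :
    l.foldl istepA
      (PySem.Dict.mk (num (PySem.List.dedup s) 1), revD (PySem.List.dedup s) 1 PySem.Dict.empty,
       ((PySem.List.dedup s).length : Int) + 1, iids)
    = (PySem.Dict.mk (num (PySem.List.dedup (s ++ l)) 1),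
       revD (PySem.List.dedup (s ++ l)) 1 PySem.Dict.empty,
       ((PySem.List.dedup (s ++ l)).length : Int) + 1,
       iids ++ l.map (fun x => tagOf (PySem.List.dedup (s ++ l)) x)) := by
  induction l generalizing s iids with
  | nil => simp
  | cons x t ih =>
    have hstep : istepA (PySem.Dict.mk (num (PySem.List.dedup s) 1),
        revD (PySem.List.dedup s) 1 PySem.Dict.empty,
        ((PySem.List.dedup s).length : Int) + 1, iids) x
        = (PySem.Dict.mk (num (PySem.List.dedup (s ++ [x])) 1),
           revD (PySem.List.dedup (s ++ [x])) 1 PySem.Dict.empty,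
           ((PySem.List.dedup (s ++ [x])).length : Int) + 1,
           iids ++ [tagOf (PySem.List.dedup (s ++ [x])) x]) := by
      by_cases hx : x ∈ s
      · have hc : (PySem.Dict.mk (num (PySem.List.dedup s) 1)).contains x = true := by
          rw [contains_mk_num]
          simpa using (PySem.List.mem_dedup _ _).mpr hx
        rw [dedup_snoc_mem s x hx]
        simp only [istepA]
        rw [hc]
        simp [tagOf]
      · have hc : (PySem.Dict.mk (num (PySem.List.dedup s) 1)).contains x = false := by
          rw [contains_mk_num]
          simp only [List.contains_eq_mem, decide_eq_false_iff_not]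
          exact fun hc' => hx ((PySem.List.mem_dedup _ _).mp hc')
        have hxd : x ∉ PySem.List.dedup s := fun hc' => hx ((PySem.List.mem_dedup _ _).mp hc')
        have htag : tagOf (PySem.List.dedup s ++ [x]) x
            = PySem.Int.toStr (1 + ((PySem.List.dedup s).length : Int)) := by
          unfold tagOf
          exact getD_mk_num_self _ _ _ hxd
        rw [dedup_snoc_not_mem s x hx, revD_snoc, num_append, htag]
        simp only [istepA]
        rw [hc]
        simp only [Bool.false_eq_true, if_false]
        rw [PySem.Dict.getD_insert_self, insert_fresh _ _ _ hc]
        push_cast [List.length_append]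
        simp [num, add_comm]
    have hsx : s ++ x :: t = (s ++ [x]) ++ t := by simp
    rw [hsx, List.foldl_cons, hstep, ih, List.map_cons,
      tag_dedup_prefix (s ++ [x]) t x (by simp)]
    simp

theorem outerA_spec (rest : List (String × List String)) (pu s U S : List String)
    (fin : PySem.Dict String (List String))
    (hU : U = pu ++ rest.map Prod.fst) (hS : S = s ++ rest.flatMap Prod.snd) (hnd : U.Nodup) :
    rest.foldl ostepA
      (PySem.Dict.mk (num pu 1), PySem.Dict.mk (num (PySem.List.dedup s) 1),
       revD pu 1 PySem.Dict.empty, revD (PySem.List.dedup s) 1 PySem.Dict.empty,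
       (pu.length : Int) + 1, ((PySem.List.dedup s).length : Int) + 1, fin)
    = (PySem.Dict.mk (num U 1), PySem.Dict.mk (num (PySem.List.dedup S) 1),
       revD U 1 PySem.Dict.empty, revD (PySem.List.dedup S) 1 PySem.Dict.empty,
       (U.length : Int) + 1, ((PySem.List.dedup S).length : Int) + 1,
       rest.foldl (fun d p => d.insert (tagOf U p.1) (p.2.map (fun i => tagOf (PySem.List.dedup S) i))) fin) := by
  induction rest generalizing pu s fin U S with
  | nil =>
    subst hU hS
    simp
  | cons p rest' ih =>
    obtain ⟨u, its⟩ := p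
    have hU' : U = (pu ++ [u]) ++ rest'.map Prod.fst := by rw [hU]; simp
    have hS' : S = (s ++ its) ++ rest'.flatMap Prod.snd := by rw [hS]; simp
    have hup : u ∉ pu := by
      intro hc
      have h2 := (List.nodup_append.mp (hU ▸ hnd)).2.2
      exact h2 u hc u (by simp) rfl
    have hcu : (PySem.Dict.mk (num pu 1)).contains u = false := by
      rw [contains_mk_num]
      simp only [List.contains_eq_mem, decide_eq_false_iff_not]
      exact hup
    have hkey : tagOf U u = PySem.Int.toStr (1 + (pu.length : Int)) := by
      rw [hU', tagOf_prefix (pu ++ [u]) _ u (by simp)]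
      unfold tagOf
      exact getD_mk_num_self _ _ _ hup
    have hmap : its.map (fun x => tagOf (PySem.List.dedup (s ++ its)) x)
        = its.map (fun i => tagOf (PySem.List.dedup S) i) := by
      refine List.map_congr_left (fun i hi => ?_)
      rw [hS', tag_dedup_prefix (s ++ its) _ i (by simp [hi])]
    have hstep : ostepA (PySem.Dict.mk (num pu 1), PySem.Dict.mk (num (PySem.List.dedup s) 1),
        revD pu 1 PySem.Dict.empty, revD (PySem.List.dedup s) 1 PySem.Dict.empty,
        (pu.length : Int) + 1, ((PySem.List.dedup s).length : Int) + 1, fin) (u, its)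
        = (PySem.Dict.mk (num (pu ++ [u]) 1), PySem.Dict.mk (num (PySem.List.dedup (s ++ its)) 1),
           revD (pu ++ [u]) 1 PySem.Dict.empty, revD (PySem.List.dedup (s ++ its)) 1 PySem.Dict.empty,
           ((pu ++ [u]).length : Int) + 1, ((PySem.List.dedup (s ++ its)).length : Int) + 1,
           fin.insert (tagOf U u) (its.map (fun i => tagOf (PySem.List.dedup S) i))) := by
      simp only [ostepA]
      rw [hcu]
      simp only [Bool.false_eq_true, if_false]
      rw [innerA_spec its s []]
      dsimp only
      rw [PySem.Dict.getD_insert_self, insert_fresh _ _ _ hcu, hkey, hmap, num_append, revD_snoc]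
      push_cast [List.length_append]
      simp [num, add_comm]
    rw [List.foldl_cons, List.foldl_cons, hstep]
    exact ih _ _ _ _ (fin.insert (tagOf U u) (its.map (fun i => tagOf (PySem.List.dedup S) i)))
      hU' hS' hnd

theorem enum_fold_rev (l : List String) (k : Int) (d : PySem.Dict String String) :
    (PySem.List.enumerate l k).foldl (fun d p => d.insert (PySem.Int.toStr p.1) p.2) d = revD l k d := by
  induction l generalizing k d with
  | nil => simp [PySem.List.enumerate, revD]
  | cons x t ih => simp [PySem.List.enumerate, revD, ih]

theorem enum_fold_fwd_gen (l : List String) (k : Int) (d : PySem.Dict String String)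
    (hnd : l.Nodup) (hfresh : ∀ x ∈ l, d.contains x = false) :
    (PySem.List.enumerate l k).foldl (fun d p => d.insert p.2 (PySem.Int.toStr p.1)) d
      = PySem.Dict.mk (d.items ++ num l k) := by
  induction l generalizing k d with
  | nil => simp [PySem.List.enumerate, num]
  | cons x t ih =>
    have hx : d.contains x = false := hfresh x (by simp)
    have hfresh' : ∀ y ∈ t, (d.insert x (PySem.Int.toStr k)).contains y = false := by
      intro y hy
      rw [PySem.Dict.contains_insert]
      have hyx : ¬ (y == x) = true := by
        simp only [beq_iff_eq]; intro hc; exact (List.nodup_cons.mp hnd).1 (hc ▸ hy)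
      simp only [Bool.or_eq_false_iff]
      exact ⟨by simpa using hyx, hfresh y (by simp [hy])⟩
    simp only [PySem.List.enumerate, List.foldl_cons]
    rw [ih (k + 1) _ (List.nodup_cons.mp hnd).2 hfresh', insert_fresh d x _ hx]
    simp [num]

theorem enum_fold_fwd (l : List String) (k : Int) (hnd : l.Nodup) :
    (PySem.List.enumerate l k).foldl (fun d p => d.insert p.2 (PySem.Int.toStr p.1)) PySem.Dict.empty
      = PySem.Dict.mk (num l k) := by
  have := enum_fold_fwd_gen l k PySem.Dict.empty hnd (by intro x _; simp)
  simpa [PySem.Dict.empty] using this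

-- ===== VERDICT (by name: the statement is the Claim_ definition above) =====
theorem id_map_spec : Claim_equal_id_map := by
  intro ui _hdom hpre
  show _root_.id_map ui = id_map_alt ui
  have hnd : (ui.map Prod.fst).Nodup := hpre
  have h := outerA_spec ui [] [] (ui.map Prod.fst) (ui.flatMap Prod.snd) PySem.Dict.empty
    (by simp) (by simp) hnd
  simp only [tagOf] at h
  simp only [_root_.id_map, id_map_alt]
  rw [enum_fold_rev, enum_fold_rev, enum_fold_fwd _ _ hnd,
    enum_fold_fwd _ _ (by simp [PySem.List.dedup_eq_ofList, PySem.Set.nodup_ofList])]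
  norm_num [num, revD, PySem.Dict.empty] at h
  simp only [PySem.Dict.empty, PySem.List.dedup_eq_ofList]
  rw [h]
  norm_num
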